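-- pv_equiv track=rewrite | github.com/satvikhorse1111-wq/ascii-ascent | maps.py | _valid_list
-- ===== SOURCE A (Python) =====
-- def _valid_list(_map: list):
--
--     if not _map:
--         return False
--     if not all(isinstance(line, str) for line in _map):
--         return False
--
--     # All lines of the map must have uniform width
--     if len({len(line) for line in _map}) > 1:
--         return False
--
--     return True
-- ===== SOURCE B (Python) =====
-- def _valid_list(_map: list):
--     # Single fused pass: capture the width of the first line, then check
--     # type and width of every line in one loop (isinstance before len).
--     if not _map:
--         return False
--     width = len(_map[0])
--     for line in _map:
--         if not isinstance(line, str):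
--             return False
--         if len(line) != width:
--             return False
--     return True
-- ===== Notes on version B (the rewrite author's own statement) =====
-- stated objective: simpler
-- what changed: Replaced A's two separate generator scans (all(isinstance...) plus a set comprehension of lengths) with one fused loop that captures the first line's width and checks each line once.
import Mathlib
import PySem

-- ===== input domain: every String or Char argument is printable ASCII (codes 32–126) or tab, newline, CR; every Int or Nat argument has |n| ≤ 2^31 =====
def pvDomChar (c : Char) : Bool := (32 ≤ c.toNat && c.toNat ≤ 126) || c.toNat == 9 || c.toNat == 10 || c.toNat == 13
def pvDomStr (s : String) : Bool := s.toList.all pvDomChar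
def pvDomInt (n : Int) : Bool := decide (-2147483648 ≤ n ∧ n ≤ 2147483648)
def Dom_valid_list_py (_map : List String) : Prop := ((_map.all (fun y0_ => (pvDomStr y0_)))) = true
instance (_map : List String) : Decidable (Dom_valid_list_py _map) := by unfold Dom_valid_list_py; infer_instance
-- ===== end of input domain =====

-- B fuses A's two scans (isinstance check + set-of-lengths) into one loop against the first line's width; objective: simpler.

-- ===== PORT A =====
-- isinstance(line, str) is always True for a List String argument.
def valid_list_py (_map : List String) : Bool :=
  if _map.isEmpty then false
  else if !(_map.all (fun _line => true)) then false
  else if (PySem.Set.ofList (_map.map (fun line => PySem.Str.len line))).length > 1 then false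
  else true

-- ===== PORT B =====
def validLoopB (width : Int) : List String → Bool
  | [] => true
  | line :: rest => if PySem.Str.len line ≠ width then false else validLoopB width rest

def valid_list_py_alt (_map : List String) : Bool :=
  match _map with
  | [] => false
  | first :: _ => validLoopB (PySem.Str.len first) _map

-- ===== PRECONDITION & SPEC =====
def Spec_valid_list_py (_map : List String) (out : Bool) : Prop := out = valid_list_py_alt _map
instance (_map : List String) (out : Bool) : Decidable (Spec_valid_list_py _map out) := by unfold Spec_valid_list_py; infer_instance

-- ===== CLAIM (what is proved, stated in full; the proofs are below) =====
def Claim_equal_valid_list_py : Prop := ∀ (_map : List String), Dom_valid_list_py _map → Spec_valid_list_py _map (valid_list_py _map)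

-- ===== LEMMAS AND PROOFS =====

theorem len_le_foldl_add {α : Type} [BEq α] (l : List α) (s : PySem.Set α) :
    s.length ≤ (l.foldl PySem.Set.add s).length := by
  induction l generalizing s with
  | nil => simp
  | cons x xs ih =>
    simp only [List.foldl_cons]
    refine le_trans ?_ (ih (PySem.Set.add s x))
    simp only [PySem.Set.add]
    split <;> simp

theorem ofList_len_le_one (a : Int) (xs : List Int) :
    decide ((xs.foldl PySem.Set.add [a]).length ≤ 1) = xs.all (fun x => x == a) := by
  induction xs with
  | nil => simp
  | cons x xs ih =>
    simp only [List.foldl_cons, List.all_cons]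
    by_cases hx : x = a
    · subst hx
      simp only [PySem.Set.add, PySem.Set.contains]
      simp [ih]
    · have hc : PySem.Set.add [a] x = [a, x] := by
        simp [PySem.Set.add, PySem.Set.contains, hx]
      simp only [hc]
      have h2 : (2 : Nat) ≤ (xs.foldl PySem.Set.add [a, x]).length :=
        len_le_foldl_add xs [a, x]
      have hd : decide ((xs.foldl PySem.Set.add [a, x]).length ≤ 1) = false :=
        decide_eq_false (by omega)
      simp [hd, beq_iff_eq, hx]

theorem validLoopB_eq_all (w : Int) (ls : List String) :
    validLoopB w ls = ls.all (fun l => PySem.Str.len l == w) := by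
  induction ls with
  | nil => rfl
  | cons l ls ih =>
    rw [List.all_cons, ← ih, validLoopB]
    by_cases h : PySem.Str.len l = w
    · simp only [if_neg (show ¬ PySem.Str.len l ≠ w from fun hn => hn h)]
      rw [show (PySem.Str.len l == w) = true by simp only [beq_iff_eq]; exact h]
      simp
    · simp only [if_pos h]
      rw [show (PySem.Str.len l == w) = false by simp only [beq_eq_false_iff_ne, ne_eq]; exact h]
      simp

-- ===== VERDICT (by name: the statement is the Claim_ definition above) =====
theorem valid_list_py_spec : Claim_equal_valid_list_py := by
  intro _map _hdom
  unfold Spec_valid_list_py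
  cases _map with
  | nil => rfl
  | cons h t =>
    simp only [valid_list_py, valid_list_py_alt]
    have hset : PySem.Set.ofList ((h :: t).map (fun line => PySem.Str.len line))
        = (t.map (fun line => PySem.Str.len line)).foldl PySem.Set.add [PySem.Str.len h] := rfl
    have key := ofList_len_le_one (PySem.Str.len h) (t.map (fun line => PySem.Str.len line))
    rw [validLoopB_eq_all]
    have halls : ((h :: t).all (fun l => PySem.Str.len l == PySem.Str.len h))
        = (t.map (fun line => PySem.Str.len line)).all (fun x => x == PySem.Str.len h) := by
      simp [List.all_map, Function.comp_def]
    cases hall : (t.map (fun line => PySem.Str.len line)).all (fun x => x == PySem.Str.len h) with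
    | true =>
      have hle : (PySem.Set.ofList ((h :: t).map (fun line => PySem.Str.len line))).length ≤ 1 := by
        rw [hset]; exact of_decide_eq_true (key.trans hall)
      rw [if_neg (by simp), if_neg (by simp), if_neg (by omega), halls, hall]
    | false =>
      have hgt : (PySem.Set.ofList ((h :: t).map (fun line => PySem.Str.len line))).length > 1 := by
        rw [hset]
        have hf := of_decide_eq_false (key.trans hall)
        omega
      rw [if_neg (by simp), if_neg (by simp), if_pos hgt, halls, hall]
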